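-- pv_equiv track=rewrite | github.com/kuncevichandrew2/cs336-assignment1 | cs336_basics/bpe.py | _split_on_newline_boundaries
-- ===== SOURCE A (Python) =====
-- def _split_on_newline_boundaries(chunk: str, target_bytes: int) -> list[str]:
--     """Split a chunk into sub-chunks of ~target_bytes each, breaking only at \n.
--
--     Splitting at \n is safe for the GPT-2 pretoken regex: \n is part of the
--     \\s+ alternatives, but no GPT-2 pretoken match crosses a \n boundary in a
--     way that would change tokenization when the chunk is split there.
--     Specifically the regex never matches across \n: ' ?\\p{L}+', ' ?\\p{N}+',
--     ' ?[^\\s\\p{L}\\p{N}]+' all stop at whitespace; '\\s+(?!\\S)' and '\\s+'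
--     are pure-whitespace runs but breaking them at \n still yields the same
--     token sequence (each side becomes its own whitespace-run match).
--     """
--     n = len(chunk)
--     if n <= target_bytes:
--         return [chunk]
--     # We work in characters here, not bytes. target_bytes is a soft target
--     # treating 1 char ~ 1 byte; English-heavy text makes this close enough.
--     parts: list[str] = []
--     start = 0
--     while start < n:
--         end = start + target_bytes
--         if end >= n:
--             parts.append(chunk[start:])
--             break
--         nl = chunk.rfind("\n", start, end)
--         if nl == -1 or nl <= start:
--             # No newline in window — extend forward to the next newline.
--             nl = chunk.find("\n", end)
--             if nl == -1:
--                 parts.append(chunk[start:])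
--                 break
--         parts.append(chunk[start : nl + 1])
--         start = nl + 1
--     return parts
-- ===== SOURCE B (Python) =====
-- def _split_on_newline_boundaries(chunk: str, target_bytes: int) -> list[str]:
--     """Index-based reimplementation: collect all newline positions once, then
--     walk the break points consuming a suffix of that index list (two-pointer),
--     instead of re-scanning the string with rfind/find for every window."""
--     n = len(chunk)
--     if n <= target_bytes:
--         return [chunk]
--     nls = [i for i, c in enumerate(chunk) if c == "\n"]
--     parts: list[str] = []
--     start = 0
--     while start < n:
--         end = start + target_bytes
--         if end >= n:
--             parts.append(chunk[start:])
--             break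
--         # scan the pending newline indices: last one strictly inside
--         # (start, end) wins; otherwise the first one at/after end.
--         i = 0
--         p = None
--         while i < len(nls):
--             q = nls[i]
--             if q >= end:
--                 break
--             if q > start:
--                 p = q
--             i += 1
--         if p is None:
--             if i == len(nls):
--                 parts.append(chunk[start:])
--                 break
--             p = nls[i]
--             i += 1
--         nls = nls[i:]  # indices <= p can never be used again
--         parts.append(chunk[start : p + 1])
--         start = p + 1
--     return parts
-- ===== Notes on version B (the rewrite author's own statement) =====
-- stated objective: alternative
-- what changed: A re-scans the string with rfind/find inside every window; B collects all newline indices in one pass and walks the break points by scanning a suffix of that index list (two-pointer), never touching the string again except for slicing.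
-- outside the precondition, e.g. on _split_on_newline_boundaries('\n \n', -1): A returns ['\n \n'], B returns ['\n', ' \n']; on _split_on_newline_boundaries('ab\ncd', -1): A does not finish within the time limit, B returns ['ab\n', 'cd']; on _split_on_newline_boundaries('abc', -1): A returns ['abc'], B returns ['abc']
import Mathlib
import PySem

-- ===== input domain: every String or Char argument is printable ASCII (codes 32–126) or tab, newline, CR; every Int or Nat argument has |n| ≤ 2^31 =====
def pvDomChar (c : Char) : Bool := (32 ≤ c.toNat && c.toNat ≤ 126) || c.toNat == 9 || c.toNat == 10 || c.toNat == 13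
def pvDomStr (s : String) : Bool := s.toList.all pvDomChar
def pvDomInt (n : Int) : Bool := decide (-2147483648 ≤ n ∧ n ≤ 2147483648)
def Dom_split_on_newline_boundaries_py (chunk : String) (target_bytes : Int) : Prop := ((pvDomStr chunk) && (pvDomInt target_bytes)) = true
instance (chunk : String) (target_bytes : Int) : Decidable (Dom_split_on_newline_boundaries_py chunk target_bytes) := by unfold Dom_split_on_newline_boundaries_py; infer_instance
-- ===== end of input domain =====

-- B replaces A's per-window string re-scanning (rfind/find) by one pass collecting all
-- newline indices and a suffix-consuming walk of that index list (objective: alternative).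

-- ===== PORT A =====
-- the while-loop of A; fuel bounds the iterations (inside Pre_ start grows each round,
-- so (len chunk)+1 rounds always suffice)
def pvALoop (chunk : String) (t n : Int) : Nat → Int → List String → List String
  | 0, _, parts => parts
  | fuel+1, start, parts =>
    if start < n then
      let e := start + t
      if n ≤ e then parts ++ [PySem.Str.slice chunk (some start) none]
      else
        let nl := PySem.Str.rfindFrom chunk "\n" start (some e)
        if nl = -1 ∨ nl ≤ start then
          let nl2 := PySem.Str.findFrom chunk "\n" e none
          if nl2 = -1 then parts ++ [PySem.Str.slice chunk (some start) none]
          else pvALoop chunk t n fuel (nl2+1) (parts ++ [PySem.Str.slice chunk (some start) (some (nl2+1))])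
        else pvALoop chunk t n fuel (nl+1) (parts ++ [PySem.Str.slice chunk (some start) (some (nl+1))])
    else parts

def split_on_newline_boundaries_py (chunk : String) (target_bytes : Int) : List String :=
  let n : Int := PySem.Str.len chunk
  if n ≤ target_bytes then [chunk]
  else pvALoop chunk target_bytes n (chunk.toList.length + 1) 0 []

-- ===== PORT B =====
-- the inner while-loop of B: scan the pending newline indices; the last one strictly
-- inside (start, end) wins, otherwise the first one at/after end; also returns the
-- not-yet-consumed suffix of the index list (Source B's `nls = nls[i:]`)
def pvFindBreak : List Int → Int → Int → Option Int → Option Int × List Int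
  | [], _, _, p => (p, [])
  | q :: rest, start, e, p =>
    if e ≤ q then
      match p with
      | none => (some q, rest)
      | some _ => (p, q :: rest)
    else if start < q then pvFindBreak rest start e (some q)
    else pvFindBreak rest start e p

def pvBLoop (chunk : String) (t n : Int) : Nat → List Int → Int → List String → List String
  | 0, _, _, parts => parts
  | fuel+1, nls, start, parts =>
    if start < n then
      let e := start + t
      if n ≤ e then parts ++ [PySem.Str.slice chunk (some start) none]
      else
        match pvFindBreak nls start e none with
        | (none, _) => parts ++ [PySem.Str.slice chunk (some start) none]
        | (some p, rest) => pvBLoop chunk t n fuel rest (p+1) (parts ++ [PySem.Str.slice chunk (some start) (some (p+1))])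
    else parts

def split_on_newline_boundaries_py_alt (chunk : String) (target_bytes : Int) : List String :=
  let n : Int := PySem.Str.len chunk
  if n ≤ target_bytes then [chunk]
  else
    let nls : List Int := (PySem.List.enumerate chunk.toList 0).filterMap
      (fun ic => if ic.2 = '\n' then some ic.1 else none)
    pvBLoop chunk target_bytes n (chunk.toList.length + 1) nls 0 []

-- ===== PRECONDITION & SPEC =====
-- Pre_ excludes negative target_bytes, on which A's rfind/find negative-bound wraparound
-- makes the loop hang forever on some inputs (e.g. ("ab\ncd", -1)) and produce accidental
-- wrapped-window splits on others; B returns the natural split there instead.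
def Pre_split_on_newline_boundaries_py (chunk : String) (target_bytes : Int) : Prop :=
  0 ≤ target_bytes
instance (chunk : String) (target_bytes : Int) : Decidable (Pre_split_on_newline_boundaries_py chunk target_bytes) := by unfold Pre_split_on_newline_boundaries_py; infer_instance

def pvWitness_split_on_newline_boundaries_py : String × Int := ("ab\ncd", 3)

def Spec_split_on_newline_boundaries_py (chunk : String) (target_bytes : Int) (out : List String) : Prop := out = split_on_newline_boundaries_py_alt chunk target_bytes
instance (chunk : String) (target_bytes : Int) (out : List String) : Decidable (Spec_split_on_newline_boundaries_py chunk target_bytes out) := by unfold Spec_split_on_newline_boundaries_py; infer_instance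

-- ===== CLAIM (what is proved, stated in full; the proofs are below) =====
def Claim_equal_split_on_newline_boundaries_py : Prop := ∀ (chunk : String) (target_bytes : Int), Dom_split_on_newline_boundaries_py chunk target_bytes → Pre_split_on_newline_boundaries_py chunk target_bytes → Spec_split_on_newline_boundaries_py chunk target_bytes (split_on_newline_boundaries_py chunk target_bytes)

-- ===== LEMMAS AND PROOFS =====

def pvNlAt (S : List Char) (j : Nat) : Bool := S[j]? == some '\n'
def pvNlsN (S : List Char) : List Nat := (List.range S.length).filter (pvNlAt S)

theorem pv_getLast?_cons {α : Type} (a : α) (l : List α) : (a :: l).getLast? = l.getLast?.or (some a) := by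
  cases l with
  | nil => simp
  | cons b t => rw [List.getLast?_cons_cons]; cases h : (b :: t).getLast? with
    | none => simp [List.getLast?_eq_none_iff] at h
    | some x => simp

theorem pv_mem_of_getLast? {α : Type} {l : List α} {m : α} (h : l.getLast? = some m) : m ∈ l := by
  rcases List.getLast?_eq_some_iff.mp h with ⟨ys, rfl⟩
  simp

theorem pv_getLast?_max_nat {xs : List Nat} (hs : xs.Pairwise (· < ·)) {m : Nat}
    (h : xs.getLast? = some m) : ∀ x ∈ xs, x ≤ m := by
  induction xs with
  | nil => simp at h
  | cons a l ih =>
    rw [pv_getLast?_cons] at h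
    rcases List.pairwise_cons.mp hs with ⟨ha, hl⟩
    cases hl' : l.getLast? with
    | none =>
      rw [hl', Option.none_or] at h
      obtain rfl : a = m := by simpa using h
      rw [List.getLast?_eq_none_iff] at hl'
      subst hl'; simp
    | some b =>
      rw [hl', Option.some_or] at h
      obtain rfl : b = m := by simpa using h
      intro x hx
      rcases List.mem_cons.mp hx with rfl | hx'
      · exact le_of_lt (ha _ (pv_mem_of_getLast? hl'))
      · exact ih hl hl' x hx'

theorem pv_pairwise_range' (a c : Nat) : (List.range' a c).Pairwise (· < ·) := by
  rw [List.range'_eq_map_range]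
  exact (List.pairwise_lt_range).map _ (by intro x y hxy; omega)

theorem pv_nlsN_pairwise (S : List Char) : (pvNlsN S).Pairwise (· < ·) :=
  List.pairwise_lt_range.filter _

theorem pv_nlsN_mem {S : List Char} {j : Nat} : j ∈ pvNlsN S ↔ j < S.length ∧ pvNlAt S j := by
  simp [pvNlsN, List.mem_filter, List.mem_range]

theorem pv_enum_aux : ∀ (xs : List Char) (i : Int),
    (PySem.List.enumerate xs i).filterMap (fun ic => if ic.2 = '\n' then some ic.1 else none)
      = ((List.range xs.length).filter (fun j => xs[j]? == some '\n')).map (fun (j : Nat) => i + (j : Int)) := by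
  intro xs
  induction xs with
  | nil => intro i; simp [PySem.List.enumerate_nil]
  | cons c rest ih =>
    intro i
    rw [PySem.List.enumerate_cons, List.filterMap_cons, List.length_cons,
      List.range_succ_eq_map, List.filter_cons]
    simp only [List.getElem?_cons_zero]
    have hpred : List.filter ((fun j => (c :: rest)[j]? == some '\n') ∘ Nat.succ) (List.range rest.length)
        = List.filter (fun j => rest[j]? == some '\n') (List.range rest.length) :=
      List.filter_congr (by intro j hj; simp [Function.comp])
    rw [List.filter_map, hpred, ih (i+1)]
    have hmap : ∀ L : List Nat, List.map (fun (j : Nat) => i + 1 + (j : Int)) L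
        = List.map (fun (j : Nat) => i + (j : Int)) (L.map Nat.succ) := by
      intro L
      rw [List.map_map]
      apply List.map_congr_left
      intro a ha
      simp only [Function.comp_apply]
      push_cast
      ring
    by_cases hc : c = '\n'
    · subst hc
      rw [if_pos rfl, if_pos (by simp), hmap, List.map_cons]
      simp
    · rw [if_neg hc, if_neg (by simp [hc]), hmap]

theorem pv_nls_eq (S : List Char) :
    (PySem.List.enumerate S 0).filterMap (fun ic => if ic.2 = '\n' then some ic.1 else none)
      = (pvNlsN S).map (fun (j : Nat) => (j : Int)) := by
  rw [pv_enum_aux S 0]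
  unfold pvNlsN pvNlAt
  apply List.map_congr_left; intro j hj; simp

theorem pv_gsplit (S : List Char) (a b : Nat) (hb : b ≤ S.length) :
    (pvNlsN S).filter (fun j => decide (a ≤ j) && decide (j < b))
      = (List.range' a (b - a)).filter (pvNlAt S) := by
  by_cases hab : a ≤ b
  · unfold pvNlsN
    rw [List.filter_filter, List.range_eq_range']
    have h1 : List.range' 0 S.length = List.range' 0 a ++ List.range' a (b - a) ++ List.range' b (S.length - b) := by
      rw [List.append_assoc]
      rw [show List.range' a (b-a) ++ List.range' b (S.length - b) = List.range' a (b - a + (S.length - b)) by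
        have := List.range'_append (s := a) (m := b - a) (n := S.length - b) (step := 1)
        simpa [show a + (b-a) = b by omega] using this]
      have := List.range'_append (s := 0) (m := a) (n := b - a + (S.length - b)) (step := 1)
      simp only [Nat.zero_add, one_mul] at this
      rw [show a + (b - a + (S.length - b)) = S.length by omega] at this
      exact this.symm
    rw [h1, List.filter_append, List.filter_append]
    have h2 : (List.range' 0 a).filter (fun j => decide (a ≤ j) && decide (j < b) && pvNlAt S j) = [] := by
      rw [List.filter_eq_nil_iff]; intro x hx
      rw [List.mem_range'_1] at hx; simp; intros; omega
    have h3 : (List.range' b (S.length - b)).filter (fun j => decide (a ≤ j) && decide (j < b) && pvNlAt S j) = [] := by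
      rw [List.filter_eq_nil_iff]; intro x hx
      rw [List.mem_range'_1] at hx; simp; intros; omega
    have h4 : (List.range' a (b - a)).filter (fun j => decide (a ≤ j) && decide (j < b) && pvNlAt S j)
        = (List.range' a (b - a)).filter (pvNlAt S) := by
      apply List.filter_congr; intro x hx
      rw [List.mem_range'_1] at hx
      simp [show a ≤ x from hx.1, show x < b by omega]
    rw [h2, h3, h4]
    simp
  · have hba : b - a = 0 := by omega
    rw [hba]
    simp only [List.range'_zero, List.filter_nil]
    rw [List.filter_eq_nil_iff]; intro x hx
    simp; intros; omega

theorem pv_findBreak_eq (s e : Int) : ∀ (xs : List Int), xs.Pairwise (· < ·) → ∀ (p : Option Int),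
    pvFindBreak xs s e p =
      (((xs.filter (fun q => decide (s < q) && decide (q < e))).getLast?.or
          (p.or ((xs.filter (fun q => decide (e ≤ q))).head?))),
        if ((xs.filter (fun q => decide (s < q) && decide (q < e))).getLast?.or p).isSome
          then xs.filter (fun q => decide (e ≤ q))
          else (xs.filter (fun q => decide (e ≤ q))).tail) := by
  intro xs
  induction xs with
  | nil => intro _ p; cases p <;> simp [pvFindBreak]
  | cons q rest ih =>
    intro hp p
    rcases List.pairwise_cons.mp hp with ⟨hq, hrest⟩
    by_cases he : e ≤ q
    · have hW : (q :: rest).filter (fun x => decide (s < x) && decide (x < e)) = [] := by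
        rw [List.filter_eq_nil_iff]
        intro x hx
        rcases List.mem_cons.mp hx with rfl | hx'
        · simp; intros; omega
        · have := hq x hx'; simp; intros; omega
      have hF : (q :: rest).filter (fun x => decide (e ≤ x)) = q :: rest := by
        rw [List.filter_eq_self]
        intro x hx
        rcases List.mem_cons.mp hx with rfl | hx'
        · simpa using he
        · have := hq x hx'; simp; omega
      rw [hW, hF]
      cases p with
      | none => simp [pvFindBreak, if_pos he]
      | some x => simp [pvFindBreak, if_pos he]
    · by_cases hsq : s < q
      · have hW : (q :: rest).filter (fun x => decide (s < x) && decide (x < e))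
            = q :: rest.filter (fun x => decide (s < x) && decide (x < e)) := by
          rw [List.filter_cons, if_pos (by simp; constructor <;> omega)]
        have hF : (q :: rest).filter (fun x => decide (e ≤ x)) = rest.filter (fun x => decide (e ≤ x)) := by
          rw [List.filter_cons, if_neg (by simp; omega)]
        rw [hW, hF]
        simp only [pvFindBreak]
        rw [if_neg he, if_pos hsq, ih hrest (some q)]
        simp [pv_getLast?_cons, Option.some_or]
      · have hW : (q :: rest).filter (fun x => decide (s < x) && decide (x < e))
            = rest.filter (fun x => decide (s < x) && decide (x < e)) := by
          rw [List.filter_cons, if_neg (by simp; intros; omega)]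
        have hF : (q :: rest).filter (fun x => decide (e ≤ x)) = rest.filter (fun x => decide (e ≤ x)) := by
          rw [List.filter_cons, if_neg (by simp; omega)]
        rw [hW, hF]
        simp only [pvFindBreak]
        rw [if_neg he, if_neg hsq]
        exact ih hrest p

theorem pv_singleton_prefix (l : List Char) : (['\n'] <+: l) ↔ l.head? = some '\n' := by
  cases l with
  | nil => simp
  | cons a t => simp [List.cons_prefix_cons, eq_comm]

theorem pv_mem_infix {l : List Char} (h : '\n' ∈ l) : ['\n'] <:+: l := by
  rcases List.mem_iff_getElem.mp h with ⟨i, hi, hget⟩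
  refine ⟨l.take i, l.drop (i+1), ?_⟩
  rw [show l.take i ++ ['\n'] ++ l.drop (i+1) = l.take i ++ ('\n' :: l.drop (i+1)) by simp]
  rw [← hget, ← List.drop_eq_getElem_cons hi, List.take_append_drop]

theorem pv_prefix_drop (w : List Char) (i : Nat) : (['\n'] <+: w.drop i) ↔ w[i]? = some '\n' := by
  rw [pv_singleton_prefix, List.head?_drop]

theorem pv_rfind_go (w : List Char) : ∀ k, PySem.Chars.rfind.go w ['\n'] k =
    (match ((List.range (k+1)).filter (fun i => w[i]? == some '\n')).getLast? with
      | some m => (m : Int) | none => -1) := by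
  intro k
  induction k with
  | zero =>
    show (if List.isPrefixOf ['\n'] w = true then (0:Int) else -1) = _
    by_cases h : w[0]? = some '\n'
    · rw [if_pos (List.isPrefixOf_iff_prefix.mpr (by have := (pv_prefix_drop w 0).mpr h; simpa using this))]
      simp [List.range_succ, h]
    · rw [if_neg (fun hc => h ((pv_prefix_drop w 0).mp (by simpa using List.isPrefixOf_iff_prefix.mp hc)))]
      simp [List.range_succ, h]
  | succ k ih =>
    show (if List.isPrefixOf ['\n'] (w.drop (k+1)) = true then ((k:Int)+1) else PySem.Chars.rfind.go w ['\n'] k) = _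
    rw [List.range_succ (n := k+1), List.filter_append, List.getLast?_append]
    by_cases h : w[k+1]? = some '\n'
    · rw [if_pos (List.isPrefixOf_iff_prefix.mpr ((pv_prefix_drop w (k+1)).mpr h))]
      simp [h]
    · rw [if_neg (fun hc => h ((pv_prefix_drop w (k+1)).mp (List.isPrefixOf_iff_prefix.mp hc)))]
      have : List.filter (fun i => w[i]? == some '\n') [k+1] = [] := by simp [h]
      rw [this, ih]
      simp

theorem pv_rfind_char (w : List Char) : PySem.Chars.rfind w ['\n'] =
    (match ((List.range w.length).filter (fun i => w[i]? == some '\n')).getLast? with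
      | some m => (m : Int) | none => -1) := by
  show PySem.Chars.rfind.go w ['\n'] w.length = _
  rw [pv_rfind_go, List.range_succ, List.filter_append]
  have : List.filter (fun i => w[i]? == some '\n') [w.length] = [] := by
    simp
  rw [this, List.append_nil]

theorem pv_filter_head (p : Nat → Bool) : ∀ (c a m : Nat), a ≤ m → m < a + c → p m = true →
    (∀ j, a ≤ j → j < m → ¬ p j = true) →
    ((List.range' a c).filter p).head? = some m := by
  intro c
  induction c with
  | zero => intro a m h1 h2; omega
  | succ c ih =>
    intro a m h1 h2 h3 h4
    rw [List.range'_succ, List.filter_cons]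
    by_cases hpa : p a = true
    · have : a = m := by
        by_contra hne
        exact h4 a le_rfl (by omega) hpa
      subst this
      rw [if_pos hpa]
      rfl
    · have hne : a ≠ m := fun he => hpa (he ▸ h3)
      rw [if_neg hpa]
      exact ih (a+1) m (by omega) (by omega) h3 (fun j hj1 hj2 => h4 j (by omega) hj2)

theorem pv_find_char (w : List Char) : PySem.Chars.find w ['\n'] =
    (match ((List.range w.length).filter (fun i => w[i]? == some '\n')).head? with
      | some m => (m : Int) | none => -1) := by
  by_cases hneg : PySem.Chars.find w ['\n'] = -1
  · rw [hneg]
    rw [PySem.Chars.find_eq_neg_one_iff] at hneg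
    have hnil : (List.range w.length).filter (fun i => w[i]? == some '\n') = [] := by
      rw [List.filter_eq_nil_iff]
      intro i hi
      simp only [beq_iff_eq]
      intro hc
      exact hneg (pv_mem_infix (List.mem_of_getElem? hc))
    rw [hnil]
    rfl
  · have h0 : 0 ≤ PySem.Chars.find w ['\n'] := by
      have := PySem.Chars.neg_one_le_find (s := w) (sub := ['\n'])
      omega
    obtain ⟨hpre, hmin⟩ := PySem.Chars.find_spec h0
    have hr : w[(PySem.Chars.find w ['\n']).toNat]? = some '\n' :=
      (pv_prefix_drop w _).mp hpre
    have hrlen : (PySem.Chars.find w ['\n']).toNat < w.length := by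
      by_contra hge
      rw [List.getElem?_eq_none (by omega)] at hr
      simp at hr
    have hhead : ((List.range w.length).filter (fun i => w[i]? == some '\n')).head?
        = some (PySem.Chars.find w ['\n']).toNat := by
      rw [List.range_eq_range']
      apply pv_filter_head _ w.length 0 _ (Nat.zero_le _) (by omega) (by simp [hr])
      intro j hj1 hj2
      simp only [beq_iff_eq]
      exact fun hc => hmin j hj2 ((pv_prefix_drop w j).mpr hc)
    rw [hhead]
    simp [Int.toNat_of_nonneg h0]

theorem pv_rfindFrom_eq (chunk : String) (s e : Int) (h0 : 0 ≤ s) (hse : s ≤ e)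
    (hen : e < (chunk.toList.length : Int)) :
    PySem.Str.rfindFrom chunk "\n" s (some e) =
      (match ((List.range' s.toNat (e.toNat - s.toNat)).filter (pvNlAt chunk.toList)).getLast? with
        | some m => (m : Int) | none => -1) := by
  have htl : ("\n" : String).toList = ['\n'] := rfl
  rw [PySem.Str.rfindFrom_eq, htl]
  have he0 : 0 ≤ e := le_trans h0 hse
  have hs' : (s.toNat : Int) = s := Int.toNat_of_nonneg h0
  have he' : (e.toNat : Int) = e := Int.toNat_of_nonneg he0
  have heN : e.toNat < chunk.toList.length := by omega
  have hsN : s.toNat ≤ e.toNat := by omega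
  set S := chunk.toList with hS
  unfold PySem.Chars.rfindFrom
  dsimp only
  rw [if_neg (show ¬((S.length : Int) < e) by omega)]
  rw [if_neg (show ¬(e < 0) by omega)]
  rw [if_neg (show ¬(s < 0) by omega)]
  rw [if_neg (show ¬(e < s) by omega)]
  set w := List.drop s.toNat (List.take e.toNat S) with hw
  have hwlen : w.length = e.toNat - s.toNat := by
    simp [hw, Nat.min_eq_left (le_of_lt heN)]
  have hmap : ((List.range (e.toNat - s.toNat)).filter (fun i => w[i]? == some '\n')).map
        (fun i => s.toNat + i)
      = (List.range' s.toNat (e.toNat - s.toNat)).filter (pvNlAt S) := by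
    rw [List.range'_eq_map_range, List.filter_map]
    congr 1
    apply List.filter_congr
    intro i hi
    rw [List.mem_range] at hi
    simp only [Function.comp_apply, pvNlAt, hw]
    rw [List.getElem?_drop, List.getElem?_take, if_pos (by omega)]
  rw [pv_rfind_char w, hwlen]
  cases hW : ((List.range (e.toNat - s.toNat)).filter (fun i => w[i]? == some '\n')).getLast? with
  | none =>
    rw [← hmap]
    rw [List.getLast?_map]
    rw [hW]
    simp
  | some m =>
    rw [← hmap]
    rw [List.getLast?_map]
    rw [hW]
    simp only [Option.map_some]
    rw [if_neg (show ¬((m : Int) = -1) by omega)]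
    push_cast
    rw [hs']

theorem pv_findFrom_eq (chunk : String) (e : Int) (h0 : 0 ≤ e)
    (hen : e < (chunk.toList.length : Int)) :
    PySem.Str.findFrom chunk "\n" e none =
      (match ((List.range' e.toNat (chunk.toList.length - e.toNat)).filter (pvNlAt chunk.toList)).head? with
        | some m => (m : Int) | none => -1) := by
  have htl : ("\n" : String).toList = ['\n'] := rfl
  rw [PySem.Str.findFrom_eq, htl]
  have he' : (e.toNat : Int) = e := Int.toNat_of_nonneg h0
  have heN : e.toNat < chunk.toList.length := by omega
  have hnc := PySem.Chars.findFrom_natCast chunk.toList ['\n'] e.toNat (le_of_lt heN)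
  rw [he'] at hnc
  rw [hnc]
  set S := chunk.toList with hS
  set w := S.drop e.toNat with hw
  have hwlen : w.length = S.length - e.toNat := by simp [hw]
  have hmap : ((List.range (S.length - e.toNat)).filter (fun i => w[i]? == some '\n')).map
        (fun i => e.toNat + i)
      = (List.range' e.toNat (S.length - e.toNat)).filter (pvNlAt S) := by
    rw [List.range'_eq_map_range, List.filter_map]
    congr 1
    apply List.filter_congr
    intro i hi
    simp only [Function.comp_apply, pvNlAt, hw]
    rw [List.getElem?_drop]
  rw [pv_find_char w, hwlen]
  cases hF : ((List.range (S.length - e.toNat)).filter (fun i => w[i]? == some '\n')).head? with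
  | none =>
    rw [← hmap, List.head?_map, hF]
    simp
  | some m =>
    rw [← hmap, List.head?_map, hF]
    simp only [Option.map_some]
    rw [if_neg (show ¬((m : Int) = -1) by omega)]
    push_cast
    rw [he']

theorem pv_bridge (chunk : String) (s e : Int) (h0 : 0 ≤ s)
    (hsn : s < (chunk.toList.length : Int)) (hse : s ≤ e) (hen : e < (chunk.toList.length : Int)) :
    (¬(PySem.Str.rfindFrom chunk "\n" s (some e) = -1 ∨ PySem.Str.rfindFrom chunk "\n" s (some e) ≤ s) ∧
      pvFindBreak (((pvNlsN chunk.toList).map (fun (j : Nat) => (j : Int))).filter (fun q => decide (s ≤ q))) s e none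
        = (some (PySem.Str.rfindFrom chunk "\n" s (some e)),
           ((pvNlsN chunk.toList).map (fun (j : Nat) => (j : Int))).filter
             (fun q => decide (PySem.Str.rfindFrom chunk "\n" s (some e) + 1 ≤ q)))) ∨
    ((PySem.Str.rfindFrom chunk "\n" s (some e) = -1 ∨ PySem.Str.rfindFrom chunk "\n" s (some e) ≤ s) ∧
      PySem.Str.findFrom chunk "\n" e none = -1 ∧
      (pvFindBreak (((pvNlsN chunk.toList).map (fun (j : Nat) => (j : Int))).filter (fun q => decide (s ≤ q))) s e none).1 = none) ∨
    ((PySem.Str.rfindFrom chunk "\n" s (some e) = -1 ∨ PySem.Str.rfindFrom chunk "\n" s (some e) ≤ s) ∧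
      ¬(PySem.Str.findFrom chunk "\n" e none = -1) ∧ 0 ≤ PySem.Str.findFrom chunk "\n" e none ∧
      pvFindBreak (((pvNlsN chunk.toList).map (fun (j : Nat) => (j : Int))).filter (fun q => decide (s ≤ q))) s e none
        = (some (PySem.Str.findFrom chunk "\n" e none),
           ((pvNlsN chunk.toList).map (fun (j : Nat) => (j : Int))).filter
             (fun q => decide (PySem.Str.findFrom chunk "\n" e none + 1 ≤ q)))) := by
  have he0 : 0 ≤ e := le_trans h0 hse
  have hs' : (s.toNat : Int) = s := Int.toNat_of_nonneg h0
  have he' : (e.toNat : Int) = e := Int.toNat_of_nonneg he0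
  set S := chunk.toList with hS
  have heN : e.toNat < S.length := by omega
  set nlsI := (pvNlsN S).map (fun (j : Nat) => (j : Int)) with hnlsI
  have hsortN : (pvNlsN S).Pairwise (· < ·) := pv_nlsN_pairwise S
  have hsortI : nlsI.Pairwise (· < ·) := hsortN.map _ (by intro a b hab; exact_mod_cast hab)
  have hsortC : (nlsI.filter (fun q => decide (s ≤ q))).Pairwise (· < ·) := hsortI.filter _
  have hfb := pv_findBreak_eq s e (nlsI.filter (fun q => decide (s ≤ q))) hsortC none
  simp only [Option.none_or, Option.or_none] at hfb
  have hWcur : (nlsI.filter (fun q => decide (s ≤ q))).filter (fun q => decide (s < q) && decide (q < e))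
      = ((List.range' (s.toNat + 1) (e.toNat - (s.toNat + 1))).filter (pvNlAt S)).map (fun (j : Nat) => (j : Int)) := by
    rw [List.filter_filter, hnlsI, List.filter_map, ← pv_gsplit S (s.toNat + 1) e.toNat (le_of_lt heN)]
    congr 1
    apply List.filter_congr
    intro j hj
    simp only [Function.comp_apply, ← Bool.decide_and]
    exact decide_eq_decide.mpr (by omega)
  have hFcur : (nlsI.filter (fun q => decide (s ≤ q))).filter (fun q => decide (e ≤ q))
      = ((List.range' e.toNat (S.length - e.toNat)).filter (pvNlAt S)).map (fun (j : Nat) => (j : Int)) := by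
    rw [List.filter_filter, hnlsI, List.filter_map, ← pv_gsplit S e.toNat S.length le_rfl]
    congr 1
    apply List.filter_congr
    intro j hj
    have hjlen : j < S.length := (pv_nlsN_mem.mp hj).1
    simp only [Function.comp_apply, ← Bool.decide_and]
    exact decide_eq_decide.mpr (by omega)
  rw [pv_rfindFrom_eq chunk s e h0 hse hen, pv_findFrom_eq chunk e he0 hen]
  rw [hWcur, hFcur, List.getLast?_map, List.head?_map] at hfb
  cases hW : ((List.range' (s.toNat + 1) (e.toNat - (s.toNat + 1))).filter (pvNlAt S)).getLast? with
  | some m =>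
    left
    have hmW := pv_mem_of_getLast? hW
    rcases List.mem_filter.mp hmW with ⟨hmr, hmnl⟩
    have hmb := List.mem_range'_1.mp hmr
    have hm1 : s.toNat + 1 ≤ m := hmb.1
    have hm2 : m < e.toNat := by
      rcases hmb with ⟨h1, h2⟩
      omega
    have hWN : ((List.range' s.toNat (e.toNat - s.toNat)).filter (pvNlAt S)).getLast? = some m := by
      rw [show e.toNat - s.toNat = (e.toNat - (s.toNat + 1)) + 1 by omega, List.range'_succ]
      rw [List.filter_cons]
      by_cases hnl0 : pvNlAt S s.toNat
      · rw [if_pos hnl0, pv_getLast?_cons, hW]; rfl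
      · rw [if_neg (by simp [hnl0]), hW]
    rw [hWN]
    have hrest : nlsI.filter (fun q => decide ((m : Int) + 1 ≤ q))
        = ((List.range' e.toNat (S.length - e.toNat)).filter (pvNlAt S)).map (fun (j : Nat) => (j : Int)) := by
      rw [hnlsI, List.filter_map, ← pv_gsplit S e.toNat S.length le_rfl]
      congr 1
      apply List.filter_congr
      intro j hj
      rcases pv_nlsN_mem.mp hj with ⟨hjlen, hjnl⟩
      simp only [Function.comp_apply, ← Bool.decide_and]
      apply decide_eq_decide.mpr
      constructor
      · intro hj1
        constructor
        · by_contra hj2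
          have hjW : j ∈ (List.range' (s.toNat + 1) (e.toNat - (s.toNat + 1))).filter (pvNlAt S) := by
            rw [List.mem_filter, List.mem_range'_1]
            refine ⟨⟨by omega, by omega⟩, hjnl⟩
          have := pv_getLast?_max_nat ((pv_pairwise_range' _ _).filter _) hW j hjW
          omega
        · exact hjlen
      · intro hj1; omega
    constructor
    · show ¬(((m : Nat) : Int) = -1 ∨ ((m : Nat) : Int) ≤ s)
      omega
    · show pvFindBreak (nlsI.filter (fun q => decide (s ≤ q))) s e none
        = (some ((m : Nat) : Int), nlsI.filter (fun q => decide (((m : Nat) : Int) + 1 ≤ q)))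
      rw [hfb, hW, hrest]
      simp
  | none =>
    have hcond : ((match ((List.range' s.toNat (e.toNat - s.toNat)).filter (pvNlAt S)).getLast? with
        | some m => (m : Int) | none => -1) = -1 ∨
        (match ((List.range' s.toNat (e.toNat - s.toNat)).filter (pvNlAt S)).getLast? with
        | some m => (m : Int) | none => -1) ≤ s) := by
      by_cases hc : s.toNat < e.toNat
      · rw [show e.toNat - s.toNat = (e.toNat - (s.toNat + 1)) + 1 by omega, List.range'_succ,
          List.filter_cons]
        by_cases hnl0 : pvNlAt S s.toNat
        · rw [if_pos hnl0, pv_getLast?_cons, hW]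
          right
          show ((s.toNat : Nat) : Int) ≤ s
          omega
        · rw [if_neg (by simp [hnl0]), hW]
          exact Or.inl (by simp)
      · rw [show e.toNat - s.toNat = 0 by omega]
        simp only [List.range'_zero, List.filter_nil, List.getLast?_nil]
        exact Or.inl (by simp)
    cases hF : ((List.range' e.toNat (S.length - e.toNat)).filter (pvNlAt S)).head? with
    | some m2 =>
      right; right
      rcases List.head?_eq_some_iff.mp hF with ⟨ys, hys⟩
      have hm2mem : m2 ∈ (List.range' e.toNat (S.length - e.toNat)).filter (pvNlAt S) := by
        rw [hys]; simp
      rcases List.mem_filter.mp hm2mem with ⟨hm2r, hm2nl⟩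
      have hm2b := List.mem_range'_1.mp hm2r
      have hFsort : ((List.range' e.toNat (S.length - e.toNat)).filter (pvNlAt S)).Pairwise (· < ·) :=
        (pv_pairwise_range' _ _).filter _
      have hys_gt : ∀ x ∈ ys, m2 < x := by
        rw [hys] at hFsort
        exact (List.pairwise_cons.mp hFsort).1
      have hrest : nlsI.filter (fun q => decide (((m2 : Nat) : Int) + 1 ≤ q))
          = ys.map (fun (j : Nat) => (j : Int)) := by
        have hnat : (pvNlsN S).filter (fun j => decide (m2 + 1 ≤ j)) = ys := by
          have step1 : (pvNlsN S).filter (fun j => decide (m2 + 1 ≤ j))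
              = ((pvNlsN S).filter (fun j => decide (e.toNat ≤ j) && decide (j < S.length))).filter
                  (fun j => decide (m2 < j)) := by
            rw [List.filter_filter]
            apply List.filter_congr
            intro j hj
            rcases pv_nlsN_mem.mp hj with ⟨hjlen, hjnl⟩
            simp only [← Bool.decide_and]
            exact decide_eq_decide.mpr (by omega)
          rw [step1, pv_gsplit S e.toNat S.length le_rfl, hys, List.filter_cons]
          rw [if_neg (by simp)]
          exact List.filter_eq_self.mpr (fun x hx => by simp [hys_gt x hx])
        rw [hnlsI, List.filter_map, ← hnat]
        congr 1
        apply List.filter_congr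
        intro j hj
        simp only [Function.comp_apply]
        exact decide_eq_decide.mpr (by omega)
      refine ⟨hcond, ?_, ?_, ?_⟩
      · show ¬(((m2 : Nat) : Int) = -1)
        omega
      · show (0 : Int) ≤ ((m2 : Nat) : Int)
        omega
      · show pvFindBreak (nlsI.filter (fun q => decide (s ≤ q))) s e none
          = (some ((m2 : Nat) : Int), nlsI.filter (fun q => decide (((m2 : Nat) : Int) + 1 ≤ q)))
        rw [hfb, hW, hF, hrest, hys, List.map_cons, List.tail_cons]
        simp
    | none =>
      right; left
      refine ⟨hcond, rfl, ?_⟩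
      rw [hfb, hW, hF]
      rfl

theorem pv_loop_eq (chunk : String) (t : Int) (ht : 0 ≤ t) :
    ∀ (fuel : Nat) (start : Int) (parts : List String), 0 ≤ start →
      pvALoop chunk t (PySem.Str.len chunk) fuel start parts =
      pvBLoop chunk t (PySem.Str.len chunk) fuel
        (((pvNlsN chunk.toList).map (fun (j : Nat) => (j : Int))).filter (fun q => decide (start ≤ q)))
        start parts := by
  have hn : PySem.Str.len chunk = (chunk.toList.length : Int) := rfl
  intro fuel
  induction fuel with
  | zero => intro start parts h0; rfl
  | succ fuel ih =>
    intro start parts h0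
    simp only [pvALoop, pvBLoop]
    by_cases hlt : start < PySem.Str.len chunk
    · rw [if_pos hlt, if_pos hlt]
      by_cases hend : PySem.Str.len chunk ≤ start + t
      · rw [if_pos hend, if_pos hend]
      · rw [if_neg hend, if_neg hend]
        have hb := pv_bridge chunk start (start + t) h0 (by omega) (by omega) (by rw [hn] at hend; omega)
        rcases hb with ⟨hcond, hfb⟩ | ⟨hcond, hnl2, hfb1⟩ | ⟨hcond, hnl2, hnl2p, hfb⟩
        · rw [if_neg hcond, hfb]
          exact ih _ _ (by omega)
        · rw [if_pos hcond, if_pos hnl2]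
          have : pvFindBreak (((pvNlsN chunk.toList).map (fun (j : Nat) => (j : Int))).filter
              (fun q => decide (start ≤ q))) start (start + t) none
              = (none, (pvFindBreak (((pvNlsN chunk.toList).map (fun (j : Nat) => (j : Int))).filter
                  (fun q => decide (start ≤ q))) start (start + t) none).2) :=
            Prod.ext hfb1 rfl
          rw [this]
        · rw [if_pos hcond, if_neg hnl2, hfb]
          exact ih _ _ (by omega)
    · rw [if_neg hlt, if_neg hlt]

-- ===== VERDICT (by name: the statement is the Claim_ definition above) =====
theorem split_on_newline_boundaries_py_spec : Claim_equal_split_on_newline_boundaries_py := by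
  intro chunk t _ hpre
  unfold Spec_split_on_newline_boundaries_py
  simp only [split_on_newline_boundaries_py, split_on_newline_boundaries_py_alt]
  by_cases h : PySem.Str.len chunk ≤ t
  · rw [if_pos h, if_pos h]
  · rw [if_neg h, if_neg h, pv_nls_eq chunk.toList]
    have hfilter : ((pvNlsN chunk.toList).map (fun (j : Nat) => (j : Int)))
        = ((pvNlsN chunk.toList).map (fun (j : Nat) => (j : Int))).filter (fun q => decide ((0:Int) ≤ q)) := by
      rw [eq_comm, List.filter_eq_self]
      intro a ha
      simp only [List.mem_map] at ha
      obtain ⟨j, -, rfl⟩ := ha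
      simp
    rw [hfilter]
    exact pv_loop_eq chunk t hpre (chunk.toList.length + 1) 0 [] le_rfl
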